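-- pv_equiv track=rewrite | github.com/erclaudio/encoded_message | encoded_message.py | construct_pyramid_words
-- ===== SOURCE A (Python) =====
-- def construct_pyramid_words(word_number_dict):
--     """Constructs a list of words based on a pyramid pattern."""
--     result = []
--     current_index = 1  # Starting index
--     step_increase = 2  # Initial step increase
--     max_index = max(word_number_dict.keys())  # Get the maximum index to avoid going out of bounds
--
--     if 1 in word_number_dict:  # Check if the starting index is in the dictionary
--         result.append(word_number_dict[1])
--
--     while current_index <= max_index:
--         current_index += step_increase
--         step_increase += 1
--         if current_index in word_number_dict:  # Check if the current index is in the dictionary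
--             result.append(word_number_dict[current_index])
--
--     return result
-- ===== SOURCE B (Python) =====
-- def construct_pyramid_words(word_number_dict):
--     """Constructs a list of words based on a pyramid pattern.
--
--     Precompute the set of triangular indices up to the maximum key, then
--     collect the values of the triangular keys in increasing key order.
--     """
--     max_index = max(word_number_dict.keys())
--     triangulars = set()
--     n = 1
--     t = 1
--     while t <= max_index:
--         triangulars.add(t)
--         n += 1
--         t = n * (n + 1) // 2
--     return [word_number_dict[k] for k in sorted(word_number_dict) if k in triangulars]
-- ===== Notes on version B (the rewrite author's own statement) =====
-- stated objective: alternative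
-- what changed: B precomputes the triangular indices up to the maximum key and returns the values of the sorted keys that are triangular, instead of A's walk over indices with a growing step that probes the dict at each step.
import Mathlib
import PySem

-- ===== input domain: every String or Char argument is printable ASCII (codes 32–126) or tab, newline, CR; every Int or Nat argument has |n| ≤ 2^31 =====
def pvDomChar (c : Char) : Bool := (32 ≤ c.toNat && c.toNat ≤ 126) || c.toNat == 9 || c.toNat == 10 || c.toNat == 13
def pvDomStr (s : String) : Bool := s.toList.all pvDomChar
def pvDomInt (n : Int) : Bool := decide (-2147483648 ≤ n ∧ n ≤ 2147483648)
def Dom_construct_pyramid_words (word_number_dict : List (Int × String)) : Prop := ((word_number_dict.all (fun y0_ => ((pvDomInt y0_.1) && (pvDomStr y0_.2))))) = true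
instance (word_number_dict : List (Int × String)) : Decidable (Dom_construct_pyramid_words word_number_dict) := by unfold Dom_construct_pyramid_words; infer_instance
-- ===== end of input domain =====

-- B collects the values at triangular keys by precomputing the triangular indices up to the
-- maximum key and filtering the sorted key list, instead of A's walk over growing-step indices.

-- n ≤ n*(n+1)/2 (cited by the termination proofs of the B-side loop)
theorem pvTri_succ (n : Nat) : (n + 1) * (n + 1 + 1) / 2 = n * (n + 1) / 2 + (n + 1) := by
  have h : (n + 1) * (n + 1 + 1) = n * (n + 1) + (n + 1) * 2 := by ring
  rw [h, Nat.add_mul_div_right _ _ (by omega : 0 < 2)]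
theorem pvTri_ge (n : Nat) : n ≤ n * (n + 1) / 2 := by
  induction n with
  | zero => simp
  | succ k ih => have h := pvTri_succ k; omega

-- ===== PORT A =====
-- the while-loop: `while current_index <= max_index: current_index += step_increase; step_increase += 1; …`
-- (step_increase is only ever a positive int in A, carried in a positivity subtype for termination)
def pvLoopA (d : PySem.Dict Int String) (mx cur : Int) (step : {s : Int // 1 ≤ s})
    (acc : List String) : List String :=
  if cur ≤ mx then
    pvLoopA d mx (cur + step.val) ⟨step.val + 1, by omega⟩
      (if d.contains (cur + step.val) then acc ++ [d.getD (cur + step.val) ""] else acc)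
  else acc
termination_by (mx + 1 - cur).toNat
decreasing_by
  have := step.2; omega

def construct_pyramid_words (word_number_dict : List (Int × String)) : List String :=
  let d := PySem.Dict.ofList word_number_dict
  match PySem.List.max? d.keys (fun k => k) with
  | none => []  -- Python: max() raises ValueError on an empty dict; excluded by Pre_
  | some max_index =>
    let result := if d.contains 1 then [d.getD 1 ""] else []
    pvLoopA d max_index 1 ⟨2, by omega⟩ result

-- ===== PORT B =====
-- the while-loop `while t <= max_index: triangulars.add(t); n += 1; t = n*(n+1)//2`;
-- n is only ever a positive int, carried as Nat; at every loop head t equals n*(n+1)/2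
-- (initially n = 1, t = 1), so t is recomputed from n here — the same value each iteration.
def pvLoopB (mx : Int) (n : Nat) (triangulars : PySem.Set Int) : PySem.Set Int :=
  if ((n * (n + 1) / 2 : Nat) : Int) ≤ mx then
    pvLoopB mx (n + 1) (PySem.Set.add triangulars ((n * (n + 1) / 2 : Nat) : Int))
  else triangulars
termination_by (mx + 1 - n).toNat
decreasing_by
  have := pvTri_ge n; omega

def construct_pyramid_words_alt (word_number_dict : List (Int × String)) : List String :=
  let d := PySem.Dict.ofList word_number_dict
  match PySem.List.max? d.keys (fun k => k) with
  | none => []  -- Python: max() raises ValueError on an empty dict; excluded by Pre_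
  | some max_index =>
    let triangulars := pvLoopB max_index 1 PySem.Set.empty
    ((PySem.List.sorted d.keys (fun k => k) false).filter
        (fun k => PySem.Set.contains triangulars k)).map (fun k => d.getD k "")

-- ===== PRECONDITION & SPEC =====
-- Pre_ excludes only the empty dict, on which both Pythons raise ValueError (max() of an empty sequence).
def Pre_construct_pyramid_words (word_number_dict : List (Int × String)) : Prop :=
  word_number_dict ≠ []
instance (word_number_dict : List (Int × String)) : Decidable (Pre_construct_pyramid_words word_number_dict) := by unfold Pre_construct_pyramid_words; infer_instance
def pvWitness_construct_pyramid_words : (List (Int × String)) := [(1, "hello"), (2, "x"), (3, "world"), (6, "!")]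

def Spec_construct_pyramid_words (word_number_dict : List (Int × String)) (out : List String) : Prop := out = construct_pyramid_words_alt word_number_dict
instance (word_number_dict : List (Int × String)) (out : List String) : Decidable (Spec_construct_pyramid_words word_number_dict out) := by unfold Spec_construct_pyramid_words; infer_instance

-- ===== CLAIM (what is proved, stated in full; the proofs are below) =====
def Claim_equal_construct_pyramid_words : Prop := ∀ (word_number_dict : List (Int × String)), Dom_construct_pyramid_words word_number_dict → Pre_construct_pyramid_words word_number_dict → Spec_construct_pyramid_words word_number_dict (construct_pyramid_words word_number_dict)

-- ===== LEMMAS AND PROOFS =====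

-- the list of triangular numbers T n, T (n+1), … that are ≤ mx (what pvLoopB appends)
def pvGen (mx : Int) (n : Nat) : List Int :=
  if ((n * (n + 1) / 2 : Nat) : Int) ≤ mx then ((n * (n + 1) / 2 : Nat) : Int) :: pvGen mx (n + 1) else []
termination_by (mx + 1 - n).toNat
decreasing_by
  have := pvTri_ge n; omega

theorem pvTri_lt_succ (n : Nat) : n * (n + 1) / 2 < (n + 1) * (n + 1 + 1) / 2 := by
  have h := pvTri_succ n; omega

theorem pvGen_mem {mx : Int} {n : Nat} {x : Int} (hx : x ∈ pvGen mx n) :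
    ((n * (n + 1) / 2 : Nat) : Int) ≤ x ∧ x ≤ mx := by
  induction n using pvGen.induct mx with
  | case1 n h ih =>
    rw [pvGen, if_pos h] at hx
    rcases List.mem_cons.mp hx with rfl | hx'
    · exact ⟨le_refl _, h⟩
    · have h2 := ih hx'
      have hltI : ((n * (n + 1) / 2 : Nat) : Int) < (((n + 1) * (n + 1 + 1) / 2 : Nat) : Int) := by
        exact_mod_cast pvTri_lt_succ n
      exact ⟨le_trans (le_of_lt hltI) h2.1, h2.2⟩
  | case2 n h =>
    rw [pvGen, if_neg h] at hx
    simp at hx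

theorem pvGen_pairwise (mx : Int) (n : Nat) : (pvGen mx n).Pairwise (· < ·) := by
  induction n using pvGen.induct mx with
  | case1 n h ih =>
    rw [pvGen, if_pos h]
    refine List.pairwise_cons.mpr ⟨fun x hx => ?_, ih⟩
    have h2 := (pvGen_mem hx).1
    have hltI : ((n * (n + 1) / 2 : Nat) : Int) < (((n + 1) * (n + 1 + 1) / 2 : Nat) : Int) := by
      exact_mod_cast pvTri_lt_succ n
    exact lt_of_lt_of_le hltI h2
  | case2 n h =>
    rw [pvGen, if_neg h]
    exact List.Pairwise.nil

-- pvLoopB appends pvGen to its accumulator (every generated element is fresh)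
theorem pvLoopB_eq (mx : Int) (n : Nat) (s : PySem.Set Int)
    (hs : ∀ x ∈ s, x < ((n * (n + 1) / 2 : Nat) : Int)) :
    pvLoopB mx n s = s ++ pvGen mx n := by
  induction n using pvGen.induct mx generalizing s with
  | case1 n h ih =>
    rw [pvLoopB, pvGen, if_pos h, if_pos h]
    have hfresh : ((n * (n + 1) / 2 : Nat) : Int) ∉ s := fun hm => lt_irrefl _ (hs _ hm)
    rw [PySem.Set.add_of_not_mem hfresh, ih]
    · simp
    · intro x hx
      have hltI : ((n * (n + 1) / 2 : Nat) : Int) < (((n + 1) * (n + 1 + 1) / 2 : Nat) : Int) := by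
        exact_mod_cast pvTri_lt_succ n
      rcases List.mem_append.mp hx with hx' | hx'
      · exact lt_trans (hs _ hx') hltI
      · rw [List.mem_singleton] at hx'; exact hx' ▸ hltI
  | case2 n h =>
    rw [pvLoopB, pvGen, if_neg h, if_neg h]
    simp

-- if-then-append normal form for A's conditional append
theorem pvIfAppend {α : Type} (c : Prop) [Decidable c] (X : List α) (v : α) :
    (if c then X ++ [v] else X) = X ++ (if c then [v] else []) := by
  split <;> simp

-- pvLoopA, started at state (cur, step) = (T n, n + 1), appends one picked value per element of pvGen mx n
theorem pvLoopA_eq (d : PySem.Dict Int String) (mx : Int)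
    (hk : ∀ k, d.contains k = true → k ≤ mx) (n : Nat) :
    ∀ (acc : List String) (step : {s : Int // 1 ≤ s}), step.val = (n : Int) + 1 →
    pvLoopA d mx ((n * (n + 1) / 2 : Nat) : Int) step
        (acc ++ (if d.contains ((n * (n + 1) / 2 : Nat) : Int) then [d.getD ((n * (n + 1) / 2 : Nat) : Int) ""] else [])) =
      acc ++ (pvGen mx n).flatMap
        (fun t => if d.contains t then [d.getD t ""] else []) := by
  induction n using pvGen.induct mx with
  | case1 n h ih =>
    intro acc step hv
    rw [pvLoopA, pvGen, if_pos h, if_pos h]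
    have hcur : ((n * (n + 1) / 2 : Nat) : Int) + step.val = (((n + 1) * (n + 1 + 1) / 2 : Nat) : Int) := by
      have h2 : (n + 1) * (n + 1 + 1) / 2 = n * (n + 1) / 2 + (n + 1) := pvTri_succ n
      rw [hv]; push_cast [h2]; ring
    rw [hcur, pvIfAppend]
    rw [ih (acc ++ (if d.contains ((n * (n + 1) / 2 : Nat) : Int) then [d.getD ((n * (n + 1) / 2 : Nat) : Int) ""] else []))
        ⟨step.val + 1, by have := step.2; omega⟩ (by simp only []; rw [hv]; push_cast; ring)]
    simp [List.flatMap_cons]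
  | case2 n h =>
    intro acc step hv
    rw [pvLoopA, pvGen, if_neg h, if_neg h]
    have hnc : d.contains ((n * (n + 1) / 2 : Nat) : Int) = false := by
      by_contra hc
      have hc' : d.contains ((n * (n + 1) / 2 : Nat) : Int) = true := by
        revert hc; cases d.contains ((n * (n + 1) / 2 : Nat) : Int) <;> simp
      exact h (hk _ hc')
    rw [hnc]
    simp

-- a flatMap over a conditional singleton picker is filter-then-map
theorem pvFlatMap_pick (d : PySem.Dict Int String) (P : List Int) :
    P.flatMap (fun t => if d.contains t then [d.getD t ""] else []) =
      (P.filter (fun t => d.contains t)).map (fun t => d.getD t "") := by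
  induction P with
  | nil => rfl
  | cons x xs ih =>
    by_cases hx : d.contains x = true
    · simp [List.flatMap_cons, hx, ih]
    · have hx' : d.contains x = false := by revert hx; cases d.contains x <;> simp
      simp [List.flatMap_cons, List.filter_cons, hx', ih]

-- two strictly increasing integer lists with the same members are equal
theorem pvSortedEq (l₁ l₂ : List Int) (h₁ : l₁.Pairwise (· < ·)) (h₂ : l₂.Pairwise (· < ·))
    (hm : ∀ x, x ∈ l₁ ↔ x ∈ l₂) : l₁ = l₂ := by
  have hn₁ : l₁.Nodup := h₁.imp (fun h => ne_of_lt h)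
  have hn₂ : l₂.Nodup := h₂.imp (fun h => ne_of_lt h)
  exact List.Perm.eq_of_pairwise (fun a b _ _ hab hba => absurd (lt_trans hab hba) (lt_irrefl a))
    h₁ h₂ ((List.perm_ext_iff_of_nodup hn₁ hn₂).mpr hm)

theorem construct_pyramid_words_spec : Claim_equal_construct_pyramid_words := by
  intro wnd _hdom hpre
  unfold Spec_construct_pyramid_words
  unfold construct_pyramid_words construct_pyramid_words_alt
  simp only []
  cases hmax : PySem.List.max? (PySem.Dict.ofList wnd).keys (fun k => k) with
  | none => rfl
  | some mx =>
    dsimp only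
    have hk : ∀ k, (PySem.Dict.ofList wnd).contains k = true → k ≤ mx := by
      intro k hc
      exact PySem.List.max?_isMax hmax k ((PySem.Dict.contains_iff_mem_keys _ _).mp hc)
    -- A's loop enumerates pvGen mx 1 and picks the present keys
    have hA : ∀ (st : {s : Int // 1 ≤ s}), st.val = 2 →
        pvLoopA (PySem.Dict.ofList wnd) mx 1 st
          (if (PySem.Dict.ofList wnd).contains 1 = true then [(PySem.Dict.ofList wnd).getD 1 ""] else []) =
        (pvGen mx 1).flatMap (fun t => if (PySem.Dict.ofList wnd).contains t then [(PySem.Dict.ofList wnd).getD t ""] else []) := by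
      intro st hv
      have h1 : ((1 * (1 + 1) / 2 : Nat) : Int) = 1 := by norm_num
      have h := pvLoopA_eq (PySem.Dict.ofList wnd) mx hk 1 [] st (by rw [hv]; norm_num)
      rw [h1, List.nil_append] at h
      exact h
    rw [hA _ rfl, pvFlatMap_pick]
    -- B's loop builds exactly pvGen mx 1
    have hB : pvLoopB mx 1 PySem.Set.empty = pvGen mx 1 := by
      have h := pvLoopB_eq mx 1 PySem.Set.empty (by intro x hx; simp [PySem.Set.empty] at hx)
      simpa [PySem.Set.empty] using h
    rw [hB]
    -- the two filtered lists are the same strictly increasing list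
    congr 1
    apply pvSortedEq
    · exact (pvGen_pairwise mx 1).filter _
    · apply List.Pairwise.filter
      have hle := PySem.List.sorted_pairwise (PySem.Dict.ofList wnd).keys (fun k => k)
      have hnd : (PySem.List.sorted (PySem.Dict.ofList wnd).keys (fun k => k) false).Nodup :=
        (PySem.List.sorted_perm (PySem.Dict.ofList wnd).keys (fun k => k) false).nodup_iff.mpr
          (PySem.Dict.nodup_keys_ofList wnd)
      have hlt : (PySem.List.sorted (PySem.Dict.ofList wnd).keys (fun k => k) false).Pairwise (· < ·) := by
        refine (List.pairwise_iff_forall_sublist.mpr ?_)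
        intro a b hsub
        have hab := List.pairwise_iff_forall_sublist.mp hle hsub
        have hne : a ≠ b := by
          intro hEq; subst hEq
          exact (List.nodup_iff_sublist.mp hnd a) hsub
        exact lt_of_le_of_ne hab hne
      exact hlt
    · intro x
      simp only [List.mem_filter]
      constructor
      · rintro ⟨hxP, hxc⟩
        refine ⟨(PySem.List.mem_sorted _ _ _ _).mpr ((PySem.Dict.contains_iff_mem_keys _ _).mp hxc), ?_⟩
        simpa [PySem.Set.contains_iff] using hxP
      · rintro ⟨hxS, hxP⟩
        have hxP' : x ∈ pvGen mx 1 := by simpa [PySem.Set.contains_iff] using hxP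
        exact ⟨hxP', (PySem.Dict.contains_iff_mem_keys _ _).mpr ((PySem.List.mem_sorted _ _ _ _).mp hxS)⟩
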